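-- pv_equiv track=rewrite | github.com/GeorgeLucasOliveira/ci_looker | tests/test_files.py | build_error_msg
-- ===== SOURCE A (Python) =====
-- def build_error_msg(errors, itens_errors):
--     error_msg = ""
--     error_msg += "\n ----------------------------- OUTPUT --------------------------\n"
--     for error in errors:
--         error_msg += f"file: {error['file_path']}"
--         error_msg += "\n"
--         for item in itens_errors:
--             error_msg += f"  field: {item}"
--             error_msg += "\n"
--
--     return error_msg
-- ===== SOURCE B (Python) =====
-- def build_error_msg(errors, itens_errors):
--     banner = "\n ----------------------------- OUTPUT --------------------------\n"
--     if not errors: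
--         return banner
--     fields = "".join("  field: " + item + "\n" for item in itens_errors)
--     # the fields block (plus the next header prefix) acts as the SEPARATOR
--     # between consecutive file paths; one str.join builds the whole body
--     sep = "\n" + fields + "file: "
--     return banner + "file: " + sep.join(e['file_path'] for e in errors) + "\n" + fields
-- ===== Notes on version B (the rewrite author's own statement) =====
-- stated objective: alternative
-- what changed: B has no per-error loop body building header+block: it treats the invariant fields block (with the next 'file: ' prefix) as a join SEPARATOR between the file paths, producing the whole body with a single str.join over paths plus an explicit empty-errors case.
import Mathlib
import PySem

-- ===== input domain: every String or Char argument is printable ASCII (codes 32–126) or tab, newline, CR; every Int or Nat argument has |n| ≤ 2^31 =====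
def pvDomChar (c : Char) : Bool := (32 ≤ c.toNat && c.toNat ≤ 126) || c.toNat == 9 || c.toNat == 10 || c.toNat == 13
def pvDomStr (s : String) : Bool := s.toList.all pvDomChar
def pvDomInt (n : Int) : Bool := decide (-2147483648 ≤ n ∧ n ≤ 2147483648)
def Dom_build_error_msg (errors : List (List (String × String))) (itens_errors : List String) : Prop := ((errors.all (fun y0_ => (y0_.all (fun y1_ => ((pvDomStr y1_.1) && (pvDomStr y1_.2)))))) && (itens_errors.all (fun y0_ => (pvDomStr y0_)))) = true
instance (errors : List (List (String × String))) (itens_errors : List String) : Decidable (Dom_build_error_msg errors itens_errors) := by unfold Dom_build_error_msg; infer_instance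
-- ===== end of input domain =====

-- B replaces the per-error loop body by one str.join over the file paths, using the
-- invariant fields block (plus the next "file: " prefix) as the separator (objective: alternative).

-- ===== PORT A =====
-- A: nested loops, += on the accumulator string; error['file_path'] is the
-- first-match lookup in the association list (Python dict access).
def build_error_msg (errors : List (List (String × String))) (itens_errors : List String) : String :=
  let error_msg : String := ""
  let error_msg := error_msg ++ "\n ----------------------------- OUTPUT --------------------------\n"
  errors.foldl (fun em error =>
    let em := em ++ ("file: " ++ PySem.Dict.getD (PySem.Dict.mk error) "file_path" "")
    let em := em ++ "\n"
    itens_errors.foldl (fun em item =>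
      let em := em ++ ("  field: " ++ item)
      em ++ "\n") em) error_msg

-- ===== PORT B =====
def build_error_msg_alt (errors : List (List (String × String))) (itens_errors : List String) : String :=
  let banner := "\n ----------------------------- OUTPUT --------------------------\n"
  match errors with
  | [] => banner
  | _ :: _ =>
    let fields := PySem.Str.join "" (itens_errors.map (fun item => "  field: " ++ item ++ "\n"))
    let sep := "\n" ++ fields ++ "file: "
    banner ++ "file: " ++
      PySem.Str.join sep (errors.map (fun e => PySem.Dict.getD (PySem.Dict.mk e) "file_path" "")) ++
      "\n" ++ fields

-- ===== PRECONDITION & SPEC =====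
-- Pre_ excludes only inputs where some error dict lacks the 'file_path' key,
-- on which Python A raises KeyError.
def Pre_build_error_msg (errors : List (List (String × String))) (itens_errors : List String) : Prop :=
  ∀ e ∈ errors, (PySem.Dict.mk e).contains "file_path" = true
instance (errors : List (List (String × String))) (itens_errors : List String) : Decidable (Pre_build_error_msg errors itens_errors) := by unfold Pre_build_error_msg; infer_instance

def pvWitness_build_error_msg : (List (List (String × String))) × List String :=
  ([[("file_path", "a.py")], [("file_path", "b.py"), ("other", "x")]], ["name", "id"])

def Spec_build_error_msg (errors : List (List (String × String))) (itens_errors : List String) (out : String) : Prop := out = build_error_msg_alt errors itens_errors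
instance (errors : List (List (String × String))) (itens_errors : List String) (out : String) : Decidable (Spec_build_error_msg errors itens_errors out) := by unfold Spec_build_error_msg; infer_instance

-- ===== CLAIM =====
def Claim_equal_build_error_msg : Prop := ∀ (errors : List (List (String × String))) (itens_errors : List String), Dom_build_error_msg errors itens_errors → Pre_build_error_msg errors itens_errors → Spec_build_error_msg errors itens_errors (build_error_msg errors itens_errors)

-- ===== LEMMAS AND PROOFS =====

-- A 'for' loop that only appends to a string accumulator, written at the String level.
theorem foldl_str_append {α : Type} (l : List α) (h : α → String) (acc : String) :
    (l.foldl (fun s x => s ++ h x) acc).toList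
      = acc.toList ++ (l.map (fun x => (h x).toList)).flatten := by
  induction l generalizing acc with
  | nil => simp
  | cons y ys ih => simp [List.foldl_cons, ih, String.toList_append, List.append_assoc]

theorem chars_join_nil (l : List (List Char)) : PySem.Chars.join [] l = l.flatten := by
  induction l with
  | nil => simp [PySem.Chars.join, List.intercalate]
  | cons x xs ih =>
    cases xs with
    | nil => simp [PySem.Chars.join, List.intercalate]
    | cons y ys => simp_all [PySem.Chars.join, List.intercalate, List.intersperse]

-- The inner loop over itens_errors appends the constant fields fragment.
theorem inner_fold (itens_errors : List String) (em : String) :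
    (itens_errors.foldl (fun em item => (em ++ ("  field: " ++ item)) ++ "\n") em).toList
      = em.toList
        ++ (itens_errors.map (fun item => ("  field: " ++ item ++ "\n").toList)).flatten := by
  have hf : (fun (em : String) item => (em ++ ("  field: " ++ item)) ++ "\n")
      = (fun (em : String) item => em ++ (("  field: " ++ item) ++ "\n")) := by
    funext em item; rw [String.append_assoc]
  rw [hf, foldl_str_append]

-- The outer loop: each iteration appends the file header, a newline, and the
-- (constant) fields fragment; generalize over the accumulator.
theorem outer_fold (itens_errors : List String) (errors : List (List (String × String))) (acc : String) :
    (errors.foldl (fun em error =>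
        itens_errors.foldl (fun em item => (em ++ ("  field: " ++ item)) ++ "\n")
          ((em ++ ("file: " ++ PySem.Dict.getD (PySem.Dict.mk error) "file_path" "")) ++ "\n"))
      acc).toList
    = acc.toList
      ++ (errors.map (fun error =>
            ("file: " ++ PySem.Dict.getD (PySem.Dict.mk error) "file_path" "").toList
              ++ "\n".toList
              ++ (itens_errors.map (fun item => ("  field: " ++ item ++ "\n").toList)).flatten)).flatten := by
  induction errors generalizing acc with
  | nil => simp
  | cons e es ih =>
    simp only [List.foldl_cons, List.map_cons, List.flatten_cons, ih]
    rw [inner_fold]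
    simp [String.toList_append, List.append_assoc]

-- B's join with the composite separator expands to exactly A's per-error blocks (nonempty case).
theorem sep_join_eq (F p : List Char) (ps : List (List Char)) :
    PySem.Chars.join ("\n".toList ++ (F ++ "file: ".toList)) (p :: ps) ++ ("\n".toList ++ F)
      = p ++ ("\n".toList ++ (F ++
          (ps.map (fun q => "file: ".toList ++ (q ++ ("\n".toList ++ F)))).flatten)) := by
  induction ps generalizing p with
  | nil => simp [PySem.Chars.join, List.intercalate]
  | cons q qs ih =>
    rw [PySem.Chars.join_cons_cons]
    simp only [List.map_cons, List.flatten_cons, List.append_assoc, ih q]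

-- ===== VERDICT =====
theorem build_error_msg_spec : Claim_equal_build_error_msg := by
  intro errors itens_errors _ _
  show build_error_msg errors itens_errors = build_error_msg_alt errors itens_errors
  cases errors with
  | nil => rfl
  | cons e es =>
    apply String.ext
    simp only [build_error_msg, build_error_msg_alt]
    rw [outer_fold]
    have h0 : "".toList = ([] : List Char) := rfl
    simp only [String.toList_append, PySem.Str.toList_join, List.map_map, Function.comp_def,
      h0, chars_join_nil, List.map_cons, List.flatten_cons, List.append_assoc, List.nil_append]
    rw [sep_join_eq]
    simp [List.map_map, Function.comp_def]
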